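-- pv_equiv track=rewrite | github.com/jvillega/App-Academy-Practice-Problems-I | NumberOfRepeatedLetters.py | numRepeats
-- ===== SOURCE A (Python) =====
-- def numRepeats( string ):
--
--     charsInString = {}
--     numRepeats = 0
--
--     for char in string:
--         if charsInString.get( char ) == None:
--             charsInString[ char ] = 1
--         else:
--             charsInString[ char ] =  charsInString.get( char ) + 1
--
--     for key in charsInString:
--         if charsInString.get( key ) > 1:
--             numRepeats += 1
--
--     return numRepeats
-- ===== SOURCE B (Python) =====
-- def numRepeats(string):
--     seen = set()
--     repeated = set()
--     for char in string:
--         if char in repeated: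
--             continue
--         if char in seen:
--             repeated.add(char)
--         else:
--             seen.add(char)
--     return len(repeated)
-- ===== Notes on version B (the rewrite author's own statement) =====
-- stated objective: faster
-- what changed: Replaced the build-a-count-dict-then-rescan-it two-pass structure with a single pass that tracks two sets (seen once / known repeated) and detects the moment a character repeats.
import Mathlib
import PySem

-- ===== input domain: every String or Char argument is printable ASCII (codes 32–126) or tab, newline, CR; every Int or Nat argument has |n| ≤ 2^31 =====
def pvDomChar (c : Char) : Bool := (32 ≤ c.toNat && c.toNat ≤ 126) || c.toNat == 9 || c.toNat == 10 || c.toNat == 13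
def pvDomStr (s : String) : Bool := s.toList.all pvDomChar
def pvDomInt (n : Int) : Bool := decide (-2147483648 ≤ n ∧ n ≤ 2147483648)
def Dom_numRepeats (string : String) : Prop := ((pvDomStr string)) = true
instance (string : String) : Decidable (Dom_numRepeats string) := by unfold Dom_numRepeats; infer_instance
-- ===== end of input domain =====

-- B replaces A's two-pass count-dict-then-rescan with a single pass over the string
-- maintaining two sets (seen / repeated); same O(n) asymptotics, measured faster by a constant factor.


-- ===== PORT A =====
-- first loop body: if charsInString.get(char) == None: d[char] = 1 else: d[char] = d.get(char) + 1
def numRepeatsCount (d : PySem.Dict Char Int) (c : Char) : PySem.Dict Char Int :=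
  match d.get? c with
  | none => d.insert c 1
  | some n => d.insert c (n + 1)

def numRepeats (string : String) : Int :=
  let charsInString := string.toList.foldl numRepeatsCount PySem.Dict.empty
  -- second loop: for key in charsInString: if charsInString.get(key) > 1: numRepeats += 1
  charsInString.keys.foldl
    (fun numRepeats key => if charsInString.getD key 0 > 1 then numRepeats + 1 else numRepeats) 0

-- ===== PORT B =====
def numRepeatsAltStep (p : PySem.Set Char × PySem.Set Char) (c : Char) :
    PySem.Set Char × PySem.Set Char :=
  if PySem.Set.contains p.2 c then p
  else if PySem.Set.contains p.1 c then (p.1, PySem.Set.add p.2 c)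
  else (PySem.Set.add p.1 c, p.2)

def numRepeats_alt (string : String) : Int :=
  let st := string.toList.foldl numRepeatsAltStep (PySem.Set.empty, PySem.Set.empty)
  PySem.Set.len st.2

-- ===== PRECONDITION & SPEC =====
def Spec_numRepeats (string : String) (out : Int) : Prop := out = numRepeats_alt string
instance (string : String) (out : Int) : Decidable (Spec_numRepeats string out) := by unfold Spec_numRepeats; infer_instance

-- ===== CLAIM (what is proved, stated in full; the proofs are below) =====
def Claim_equal_numRepeats : Prop := ∀ (string : String), Dom_numRepeats string → Spec_numRepeats string (numRepeats string)

-- ===== LEMMAS AND PROOFS =====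

-- A's first-loop body is the standard counting insert
lemma numRepeatsCount_eq :
    numRepeatsCount = fun (d : PySem.Dict Char Int) (c : Char) => d.insert c (d.getD c 0 + 1) := by
  funext d c
  unfold numRepeatsCount
  cases h : d.get? c with
  | none => simp [PySem.Dict.getD_eq_get?_getD, h]
  | some n => simp [PySem.Dict.getD_eq_get?_getD, h]

-- invariant of B's single pass
lemma altInv (cs : List Char) :
    (cs.foldl numRepeatsAltStep (PySem.Set.empty, PySem.Set.empty)).1.Nodup ∧
    (cs.foldl numRepeatsAltStep (PySem.Set.empty, PySem.Set.empty)).2.Nodup ∧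
    (∀ c, c ∈ (cs.foldl numRepeatsAltStep (PySem.Set.empty, PySem.Set.empty)).1 ↔ 1 ≤ cs.count c) ∧
    (∀ c, c ∈ (cs.foldl numRepeatsAltStep (PySem.Set.empty, PySem.Set.empty)).2 ↔ 2 ≤ cs.count c) := by
  induction cs using List.reverseRecOn with
  | nil => simp [PySem.Set.empty]
  | append_singleton cs c ih =>
    obtain ⟨h1, h2, hs, hr⟩ := ih
    rw [List.foldl_append]
    set st := cs.foldl numRepeatsAltStep (PySem.Set.empty, PySem.Set.empty) with hst
    have hcnt : ∀ x : Char, (cs ++ [c]).count x = cs.count x + (if x = c then 1 else 0) := by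
      intro x
      by_cases h : x = c <;> simp [List.count_append, List.count_eq_zero, h]
    simp only [List.foldl_cons, List.foldl_nil]
    unfold numRepeatsAltStep
    by_cases hrc : c ∈ st.2
    · have hc2 : 2 ≤ cs.count c := (hr c).mp hrc
      rw [(PySem.Set.contains_iff st.2 c).mpr hrc]
      simp only [if_true]
      refine ⟨h1, h2, fun x => ?_, fun x => ?_⟩ <;> rw [hcnt x] <;>
        [rw [hs x]; rw [hr x]] <;> by_cases hx : x = c
      · subst hx; rw [if_pos rfl]; omega
      · rw [if_neg hx]; omega
      · subst hx; rw [if_pos rfl]; omega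
      · rw [if_neg hx]; omega
    · have hrc' : PySem.Set.contains st.2 c = false :=
        Bool.eq_false_iff.mpr (fun h => hrc ((PySem.Set.contains_iff st.2 c).mp h))
      rw [hrc']
      simp only [Bool.false_eq_true, if_false]
      by_cases hsc : c ∈ st.1
      · have hc1 : 1 ≤ cs.count c := (hs c).mp hsc
        have hc2 : ¬ 2 ≤ cs.count c := fun h => hrc ((hr c).mpr h)
        rw [(PySem.Set.contains_iff st.1 c).mpr hsc]
        simp only [if_true]
        refine ⟨h1, PySem.Set.nodup_add st.2 c h2, fun x => ?_, fun x => ?_⟩ <;> rw [hcnt x] <;>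
          [rw [hs x]; rw [PySem.Set.mem_add, hr x]] <;> by_cases hx : x = c
        · subst hx; rw [if_pos rfl]; omega
        · rw [if_neg hx]; omega
        · subst hx
          rw [if_pos rfl]
          constructor
          · intro _; omega
          · intro _; right; rfl
        · rw [if_neg hx]
          constructor
          · rintro (h | h)
            · omega
            · exact absurd h hx
          · intro h; left; omega
      · have hc1 : ¬ 1 ≤ cs.count c := fun h => hsc ((hs c).mpr h)
        have hsc' : PySem.Set.contains st.1 c = false :=
          Bool.eq_false_iff.mpr (fun h => hsc ((PySem.Set.contains_iff st.1 c).mp h))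
        rw [hsc']
        simp only [Bool.false_eq_true, if_false]
        refine ⟨PySem.Set.nodup_add st.1 c h1, h2, fun x => ?_, fun x => ?_⟩ <;> rw [hcnt x] <;>
          [rw [PySem.Set.mem_add, hs x]; rw [hr x]] <;> by_cases hx : x = c
        · subst hx
          rw [if_pos rfl]
          constructor
          · intro _; omega
          · intro _; right; rfl
        · rw [if_neg hx]
          constructor
          · rintro (h | h)
            · omega
            · exact absurd h hx
          · intro h; left; omega
        · subst hx; rw [if_pos rfl]; omega
        · rw [if_neg hx]; omega

-- ===== VERDICT (by name: the statement is the Claim_ definition above) =====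
theorem numRepeats_spec : Claim_equal_numRepeats := by
  intro s _
  unfold Spec_numRepeats numRepeats numRepeats_alt
  set cs := s.toList with hcs
  -- A side: the dict is the counter of cs
  rw [numRepeatsCount_eq]
  have hgetD : ∀ v, (cs.foldl (fun (d : PySem.Dict Char Int) c => d.insert c (d.getD c 0 + 1))
      PySem.Dict.empty).getD v 0 = (cs.count v : Int) := by
    intro v
    rw [PySem.Dict.getD_foldl_insert_add_one]
    simp [PySem.Dict.getD_empty]
  have hkeys : (cs.foldl (fun (d : PySem.Dict Char Int) c => d.insert c (d.getD c 0 + 1))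
      PySem.Dict.empty).keys = PySem.Set.ofList cs := by
    rw [PySem.Dict.keys_foldl_insert]
    simp [PySem.Dict.keys_empty, PySem.Set.update_nil_left]
  set d := cs.foldl (fun (d : PySem.Dict Char Int) c => d.insert c (d.getD c 0 + 1))
      PySem.Dict.empty with hd
  -- turn A's second loop into a countP
  have hA : d.keys.foldl (fun n key => if d.getD key 0 > 1 then n + 1 else n) 0 =
      ((PySem.Set.ofList cs).countP (fun k => decide (2 ≤ cs.count k)) : Int) := by
    have hfun : (fun (n : Int) key => if d.getD key 0 > 1 then n + 1 else n) =
        (fun (n : Int) key => if (fun k => decide (2 ≤ cs.count k)) key = true then n + 1 else n) := by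
      funext n k
      simp [hgetD k]
      omega
    rw [hfun, PySem.List.foldl_count_if, hkeys]
    simp
  rw [hA]
  -- B side
  obtain ⟨_, hnd2, _, hmem2⟩ := altInv cs
  set st := cs.foldl numRepeatsAltStep (PySem.Set.empty, PySem.Set.empty) with hstdef
  have hperm : st.2.Perm ((PySem.Set.ofList cs).filter (fun k => decide (2 ≤ cs.count k))) := by
    rw [List.perm_ext_iff_of_nodup hnd2 (List.Nodup.filter _ (PySem.Set.nodup_ofList cs))]
    intro x
    simp only [List.mem_filter, PySem.Set.mem_ofList, decide_eq_true_eq]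
    constructor
    · intro hx
      have h2 := (hmem2 x).mp hx
      exact ⟨List.count_pos_iff.mp (by omega), h2⟩
    · rintro ⟨_, h2⟩
      exact (hmem2 x).mpr h2
  have hlen : st.2.length = ((PySem.Set.ofList cs).filter (fun k => decide (2 ≤ cs.count k))).length :=
    hperm.length_eq
  have : PySem.Set.len st.2 = (st.2.length : Int) := rfl
  rw [this, hlen, List.countP_eq_length_filter]
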